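-- pv_equiv track=rewrite | github.com/cmin0717/Algorithm | 2023-05(백준,프로그래머스)/110 옮기기.py | solution
-- ===== SOURCE A (Python) =====
-- def solution(s):
--
--     result = []
--
--     for word in s:
--
--         rest = []
--         cnt_110 = 0
--
--         # 문자열을 돌면서 완성되는 110을 다 뺴주고 개수를 구한다.
--         for w in word:
--             if len(rest) >= 2 and rest[-2] == '1' and rest[-1] == '1' and w == '0':
--                 cnt_110 += 1
--                 rest.pop()
--                 rest.pop()
--             else:
--                 rest.append(w)
--
--         cnt_1 = 0
--         # 110이 빠진 문자열에서 역순으로 조회할때 0이 나올때까지 조회한다.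
--         for i in range(len(rest)-1, -1, -1):
--             if rest[i] == '0':
--                 break
--             else:
--                 cnt_1 += 1
--         # 110이 빠진 문자열에서 0이 나오기전까지 나온 1의 개수와 110의 개수를 이용하여 최종 문자열을 구한다.
--         new_word = ''.join(rest[:len(rest)-cnt_1]) + '110' * cnt_110 + '1' * cnt_1
--         result.append(new_word)
--
--     return result
-- ===== SOURCE B (Python) =====
-- def solution(s):
--     result = []
--     for word in s:
--         # remove every '110' pattern by repeated leftmost replacement
--         rest = word
--         while '110' in rest:
--             rest = rest.replace('110', '', 1)
--         cnt_110 = (len(word) - len(rest)) // 3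
--         # split after the last '0'; everything beyond it is the run of trailing ones
--         n0 = rest.rfind('0') + 1
--         result.append(rest[:n0] + '110' * cnt_110 + '1' * (len(rest) - n0))
--     return result
-- ===== Notes on version B (the rewrite author's own statement) =====
-- stated objective: idiomatic
-- what changed: B replaces A's single-pass character stack that cancels '110' on the fly by a repeated 'replace leftmost 110' loop, recovers the removal count from the length difference, and splits the remainder at the last '0' via rfind instead of A's reverse index scan.
import Mathlib
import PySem

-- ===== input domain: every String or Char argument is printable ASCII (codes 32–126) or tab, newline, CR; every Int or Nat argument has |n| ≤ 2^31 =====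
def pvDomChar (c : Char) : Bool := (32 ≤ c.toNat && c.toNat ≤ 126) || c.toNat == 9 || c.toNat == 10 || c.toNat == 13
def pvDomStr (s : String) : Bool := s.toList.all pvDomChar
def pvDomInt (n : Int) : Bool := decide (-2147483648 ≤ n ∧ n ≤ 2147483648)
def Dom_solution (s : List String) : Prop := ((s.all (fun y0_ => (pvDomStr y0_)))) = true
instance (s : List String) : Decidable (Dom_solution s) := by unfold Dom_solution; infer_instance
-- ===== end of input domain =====

-- B replaces A's single-pass stack removal of '110' by a repeated leftmost replace loop,
-- recovering the count from the length difference and splitting at the last '0' (objective: idiomatic).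

-- ===== PORT A =====
-- inner loop body: the stack step of A ('rest', 'cnt_110' as state)
def stepA (st : List Char × Nat) (w : Char) : List Char × Nat :=
  if 2 ≤ st.1.length ∧ st.1.dropLast.getLast? = some '1' ∧ st.1.getLast? = some '1' ∧ w = '0'
  then (st.1.dropLast.dropLast, st.2 + 1)
  else (st.1 ++ [w], st.2)

-- the reverse-index loop of A: count elements from the end until a '0' (applied to rest.reverse)
def countTail : List Char → Nat
  | [] => 0
  | a :: t => if a = '0' then 0 else countTail t + 1

def solution (s : List String) : List String :=
  s.map (fun word =>
    let p := word.toList.foldl stepA ([], 0)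
    let rest := p.1
    let cnt110 := p.2
    let cnt1 := countTail rest.reverse
    String.mk (rest.take (rest.length - cnt1)
      ++ (List.replicate cnt110 ['1', '1', '0']).flatten
      ++ List.replicate cnt1 '1'))

-- ===== PORT B =====
-- index of the leftmost occurrence of '110' ("'110' in rest" / str.replace's search)
def find110 : List Char → Option Nat
  | [] => none
  | a :: t => if a = '1' ∧ t.take 2 = ['1', '0'] then some 0 else (find110 t).map (· + 1)

-- the while-loop of B: repeatedly delete the leftmost '110'; fuel only makes it total
-- (each deletion strictly shortens the list, so length is enough fuel)
def removeAllF : Nat → List Char → List Char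
  | 0, w => w
  | fuel + 1, w =>
    match find110 w with
    | none => w
    | some i => removeAllF fuel (w.take i ++ w.drop (i + 3))

-- rest.rfind('0') : highest index of '0', -1 if absent
def rfind0 (l : List Char) : Int :=
  match l.reverse.findIdx? (· == '0') with
  | some k => (l.length : Int) - 1 - k
  | none => -1

def solution_alt (s : List String) : List String :=
  s.map (fun word =>
    let rest := removeAllF word.toList.length word.toList
    let cnt110 := (word.toList.length - rest.length) / 3
    let n0 := (rfind0 rest + 1).toNat
    String.mk (rest.take n0
      ++ (List.replicate cnt110 ['1', '1', '0']).flatten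
      ++ List.replicate (rest.length - n0) '1'))

-- ===== PRECONDITION & SPEC =====
def Spec_solution (s : List String) (out : List String) : Prop := out = solution_alt s
instance (s : List String) (out : List String) : Decidable (Spec_solution s out) := by unfold Spec_solution; infer_instance

-- ===== CLAIM (what is proved, stated in full; the proofs are below) =====
def Claim_equal_solution : Prop := ∀ (s : List String), Dom_solution s → Spec_solution s (solution s)

-- ===== LEMMAS AND PROOFS =====

lemma stepA_one (s : List Char) (c : Nat) : stepA (s, c) '1' = (s ++ ['1'], c) := by
  simp [stepA]

lemma stepA_push (s : List Char) (c : Nat) (a : Char)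
    (h : ¬ (2 ≤ s.length ∧ s.dropLast.getLast? = some '1' ∧ s.getLast? = some '1' ∧ a = '0')) :
    stepA (s, c) a = (s ++ [a], c) := by
  simp only [stepA]; rw [if_neg h]

lemma stepA_zero (s : List Char) (c : Nat) : stepA (s ++ ['1', '1'], c) '0' = (s, c + 1) := by
  have h2 : (s ++ ['1', '1']).dropLast = s ++ ['1'] := by
    rw [show s ++ ['1', '1'] = (s ++ ['1']) ++ ['1'] by simp, List.dropLast_concat]
  have hcond : 2 ≤ (s ++ ['1', '1']).length ∧ (s ++ ['1', '1']).dropLast.getLast? = some '1'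
      ∧ (s ++ ['1', '1']).getLast? = some '1' ∧ True :=
    ⟨by simp, by rw [h2]; simp, by simp, trivial⟩
  simp only [stepA]
  rw [if_pos hcond, h2, List.dropLast_concat]

-- the count component only shifts the result by its initial value
lemma countShift (w : List Char) : ∀ (s : List Char) (c : Nat),
    List.foldl stepA (s, c) w = ((List.foldl stepA (s, 0) w).1, c + (List.foldl stepA (s, 0) w).2) := by
  induction w with
  | nil => intro s c; simp
  | cons a t ih =>
    intro s c
    by_cases h : 2 ≤ s.length ∧ s.dropLast.getLast? = some '1' ∧ s.getLast? = some '1' ∧ a = '0'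
    · have e : ∀ c' : Nat, stepA (s, c') a = (s.dropLast.dropLast, c' + 1) := fun c' => by
        simp only [stepA]; rw [if_pos h]
      simp only [List.foldl_cons, e]
      rw [ih _ (c + 1), ih _ (0 + 1)]
      simp
      omega
    · simp only [List.foldl_cons, stepA_push _ _ _ h]
      rw [ih _ c, ih _ 0]

-- scanning over an embedded '110' returns to the same stack with count+1
lemma scan110 (s : List Char) (c : Nat) (y : List Char) :
    List.foldl stepA (s, c) ('1' :: '1' :: '0' :: y) = List.foldl stepA (s, c + 1) y := by
  have h2 : (s ++ ['1']) ++ ['1'] = s ++ ['1', '1'] := by simp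
  simp only [List.foldl_cons, stepA_one, h2, stepA_zero]

lemma scan110' (P : List Char × Nat) (y : List Char) :
    List.foldl stepA P ('1' :: '1' :: '0' :: y) = List.foldl stepA (P.1, P.2 + 1) y := by
  rcases P with ⟨ps, pc⟩
  exact scan110 ps pc y

lemma shift_one (P : List Char × Nat) (y : List Char) :
    List.foldl stepA (P.1, P.2 + 1) y = ((List.foldl stepA P y).1, (List.foldl stepA P y).2 + 1) := by
  rw [countShift y P.1 (P.2 + 1), ← Prod.mk.eta (p := P), countShift y P.1 P.2]
  simp
  omega

def Has110 (l : List Char) : Prop := ∃ x y, l = x ++ '1' :: '1' :: '0' :: y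

-- a '110'-free input is pushed wholesale
lemma scan_free (w : List Char) : ∀ (s : List Char) (c : Nat), ¬ Has110 (s ++ w) →
    List.foldl stepA (s, c) w = (s ++ w, c) := by
  induction w with
  | nil => intro s c _; simp
  | cons a t ih =>
    intro s c hfree
    have hcond : ¬ (2 ≤ s.length ∧ s.dropLast.getLast? = some '1' ∧ s.getLast? = some '1' ∧ a = '0') := by
      rintro ⟨-, h2, h1, ha⟩
      subst ha
      obtain ⟨s1, hs1⟩ := List.getLast?_eq_some_iff.mp h1
      subst hs1
      rw [List.dropLast_concat] at h2
      obtain ⟨s2, hs2⟩ := List.getLast?_eq_some_iff.mp h2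
      subst hs2
      exact hfree ⟨s2, t, by simp⟩
    simp only [List.foldl_cons, stepA_push _ _ _ hcond]
    rw [ih (s ++ [a]) c (by simpa using hfree)]
    simp

lemma find110_none {w : List Char} (h : find110 w = none) : ¬ Has110 w := by
  induction w with
  | nil => rintro ⟨x, y, hxy⟩; simp at hxy
  | cons a t ih =>
    rw [find110] at h
    by_cases hc : a = '1' ∧ t.take 2 = ['1', '0']
    · rw [if_pos hc] at h; simp at h
    · rw [if_neg hc] at h
      rintro ⟨x, y, hxy⟩
      cases x with
      | nil =>
        simp only [List.nil_append, List.cons.injEq] at hxy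
        exact hc ⟨hxy.1, by rw [hxy.2]; simp⟩
      | cons b x' =>
        simp only [List.cons_append, List.cons.injEq] at hxy
        exact ih (Option.map_eq_none_iff.mp h) ⟨x', y, hxy.2⟩


lemma find110_some : ∀ {w : List Char} {i : Nat}, find110 w = some i →
    w = w.take i ++ '1' :: '1' :: '0' :: w.drop (i + 3) := by
  intro w
  induction w with
  | nil => intro i h; simp [find110] at h
  | cons a t ih =>
    intro i h
    rw [find110] at h
    by_cases hc : a = '1' ∧ t.take 2 = ['1', '0']
    · rw [if_pos hc] at h
      have hi : i = 0 := by simpa using h.symm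
      subst hi
      have ht : t = t.take 2 ++ t.drop 2 := (List.take_append_drop 2 t).symm
      rw [hc.2] at ht
      simp only [List.take_zero, List.nil_append, List.drop_succ_cons, hc.1]
      exact congrArg (fun z => '1' :: z) (by simpa using ht)
    · rw [if_neg hc] at h
      obtain ⟨j, hj, rfl⟩ := Option.map_eq_some_iff.mp h
      have h2 : (a :: t).take (j + 1) ++ '1' :: '1' :: '0' :: (a :: t).drop (j + 1 + 3)
          = a :: (t.take j ++ '1' :: '1' :: '0' :: t.drop (j + 3)) := by simp
      rw [h2]
      exact congrArg (a :: ·) (ih hj)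

lemma removeAllF_len_le : ∀ (fuel : Nat) (w : List Char), (removeAllF fuel w).length ≤ w.length := by
  intro fuel
  induction fuel with
  | zero => intro w; simp [removeAllF]
  | succ n ih =>
    intro w
    rw [removeAllF]
    cases h : find110 w with
    | none => exact le_rfl
    | some i =>
      refine le_trans (ih _) ?_
      simp only [List.length_append, List.length_take, List.length_drop]
      omega

-- main lemma: A's stack scan equals B's repeated-removal loop together with the length-difference count
lemma scan_eq_remove : ∀ (fuel : Nat) (w : List Char), w.length ≤ fuel →
    List.foldl stepA ([], 0) w
      = (removeAllF fuel w, (w.length - (removeAllF fuel w).length) / 3) := by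
  intro fuel
  induction fuel with
  | zero =>
    intro w hw
    have : w = [] := by cases w <;> simp_all
    subst this; simp [removeAllF]
  | succ n ih =>
    intro w hw
    rw [removeAllF]
    cases h : find110 w with
    | none =>
      have := scan_free w [] 0 (by simpa using find110_none h)
      simpa using this
    | some i =>
      have hsplit := find110_some h
      have hlen : w.length = (w.take i ++ w.drop (i + 3)).length + 3 := by
        conv_lhs => rw [hsplit]
        simp
        omega
      have hle' : (w.take i ++ w.drop (i + 3)).length ≤ n := by omega
      have hstep : List.foldl stepA ([], 0) w
          = ((List.foldl stepA ([], 0) (w.take i ++ w.drop (i + 3))).1,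
             (List.foldl stepA ([], 0) (w.take i ++ w.drop (i + 3))).2 + 1) := by
        conv_lhs => rw [hsplit]
        rw [List.foldl_append, List.foldl_append, scan110', shift_one]
      rw [hstep, ih _ hle']
      have hrle := removeAllF_len_le n (w.take i ++ w.drop (i + 3))
      refine Prod.ext rfl ?_
      simp only
      omega

-- tail lemmas: countTail on the reverse vs rfind-split
lemma countTail_all_ne {r : List Char} (h : ∀ a ∈ r, ¬ a = '0') : countTail r = r.length := by
  induction r with
  | nil => rfl
  | cons a t ih =>
    rw [countTail, if_neg (h a (by simp))]
    simp [ih (fun b hb => h b (by simp [hb]))]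

lemma countTail_findIdx : ∀ {r : List Char} {k : Nat},
    r.findIdx? (· == '0') = some k → countTail r = k ∧ k < r.length := by
  intro r
  induction r with
  | nil => intro k h; simp at h
  | cons a t ih =>
    intro k h
    rw [List.findIdx?_cons] at h
    by_cases ha : a = '0'
    · simp [ha] at h
      subst h
      simp [countTail, ha]
    · rw [if_neg (by simpa using ha)] at h
      obtain ⟨j, hj, rfl⟩ := Option.map_eq_some_iff.mp h
      obtain ⟨h1, h2⟩ := ih hj
      exact ⟨by simp [countTail, ha, h1], by simpa using h2⟩

-- the tail parts coincide: A's (len - cnt1, cnt1) split equals B's (n0, len - n0) split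
lemma tail_eq (rest : List Char) :
    rest.length - countTail rest.reverse = ((rfind0 rest + 1).toNat)
      ∧ countTail rest.reverse = rest.length - ((rfind0 rest + 1).toNat) := by
  unfold rfind0
  cases h : rest.reverse.findIdx? (· == '0') with
  | none =>
    have hall : ∀ a ∈ rest.reverse, ¬ a = '0' := by
      intro a ha
      have := List.findIdx?_eq_none_iff.mp h a ha
      simpa using this
    have := countTail_all_ne hall
    simp [this]
  | some k =>
    obtain ⟨h1, h2⟩ := countTail_findIdx h
    rw [List.length_reverse] at h2
    have hn : ((rest.length : Int) - 1 - k + 1).toNat = rest.length - k := by omega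
    rw [h1, hn]
    omega

-- per-word equality of the two bodies
lemma word_eq (word : List Char) :
    (let p := word.foldl stepA ([], 0)
      let rest := p.1
      let cnt110 := p.2
      let cnt1 := countTail rest.reverse
      String.mk (rest.take (rest.length - cnt1)
        ++ (List.replicate cnt110 ['1', '1', '0']).flatten ++ List.replicate cnt1 '1'))
    = (let rest := removeAllF word.length word
        let cnt110 := (word.length - rest.length) / 3
        let n0 := (rfind0 rest + 1).toNat
        String.mk (rest.take n0
          ++ (List.replicate cnt110 ['1', '1', '0']).flatten ++ List.replicate (rest.length - n0) '1')) := by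
  simp only
  rw [scan_eq_remove word.length word le_rfl]
  set rest := removeAllF word.length word
  obtain ⟨e1, e2⟩ := tail_eq rest
  rw [e1, e2]

-- ===== VERDICT (by name: the statement is the Claim_ definition above) =====
theorem solution_spec : Claim_equal_solution := by
  intro s _
  unfold Spec_solution solution solution_alt
  refine List.map_congr_left (fun word _ => ?_)
  exact word_eq word.toList
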